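-- pv_equiv track=rewrite | github.com/AmiiThinks/forget-me-not | utilities.py | get_shared_keys
-- ===== SOURCE A (Python) =====
-- def get_shared_keys(param_list):
-- 	"""
-- 	For the given list of parameter dictionaries, return a list of the dictionary
-- 	keys that appear in every parameter dictionary
--
-- 	>>> get_shared_keys([{'a':0, 'b':1, 'c':2, 'd':3}, {'a':0, 'b':1, 'c':3}, {'a':0, 'b':'beta'}])
-- 	['a', 'b']
-- 	>>> get_shared_keys([{'a':0, 'd':3}, {'a':0, 'b':1, 'c':2, 'd':3}, {'a':0, 'b':1, 'c':2}])
-- 	['a']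
-- 	"""
-- 	if not param_list:
-- 		return
-- 	keys = set(param_list[0].keys())
-- 	for i in range(1, len(param_list)):
-- 		keys = keys.intersection(param_list[i].keys())
-- 	keys = list(keys)
-- 	keys.sort()
-- 	return keys
-- ===== SOURCE B (Python) =====
-- def get_shared_keys(param_list):
-- 	"""Keys present in every dictionary, sorted.
--
-- 	Single counting pass: tally every key once, then keep the keys whose
-- 	count equals the number of dictionaries."""
-- 	if not param_list:
-- 		return
-- 	counts = {}
-- 	for d in param_list:
-- 		for k in d:
-- 			counts[k] = counts.get(k, 0) + 1
-- 	n = len(param_list)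
-- 	return sorted(k for k, c in counts.items() if c == n)
-- ===== Notes on version B (the rewrite author's own statement) =====
-- stated objective: alternative
-- what changed: Replaces the iterated set-intersection loop with a single counting pass over all keys (a frequency dict) followed by selecting keys whose count equals the number of dictionaries, then sorting.
import Mathlib
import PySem

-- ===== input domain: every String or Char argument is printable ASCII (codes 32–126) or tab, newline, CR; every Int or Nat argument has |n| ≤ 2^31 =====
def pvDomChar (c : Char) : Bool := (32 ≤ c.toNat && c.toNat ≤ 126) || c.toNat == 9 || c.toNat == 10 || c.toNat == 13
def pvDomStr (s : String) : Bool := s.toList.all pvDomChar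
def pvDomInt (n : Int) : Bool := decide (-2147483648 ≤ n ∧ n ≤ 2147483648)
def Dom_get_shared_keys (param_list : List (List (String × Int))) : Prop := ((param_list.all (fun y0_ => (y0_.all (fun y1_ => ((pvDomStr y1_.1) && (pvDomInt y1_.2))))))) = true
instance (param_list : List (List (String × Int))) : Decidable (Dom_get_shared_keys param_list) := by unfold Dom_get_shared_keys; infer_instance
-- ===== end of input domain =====

-- Header: B replaces A's iterated set intersections with one counting pass over
-- all keys plus a count==len(param_list) selection (objective: alternative).

-- ===== PORT A =====
-- A: keys = set(first dict's keys); intersect with each later dict's keys; sort.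
def get_shared_keys (param_list : List (List (String × Int))) : Option (List String) :=
  match param_list with
  | [] => none
  | d0 :: rest =>
    let keys : PySem.Set String :=
      rest.foldl (fun s d => PySem.Set.inter s (d.map Prod.fst))
        (PySem.Set.ofList (d0.map Prod.fst))
    some (PySem.List.sorted keys (fun x => x) false)

-- ===== PORT B =====
-- B: one counting pass over every dict's keys, then keep keys with count == len(param_list), sorted.
def get_shared_keys_alt (param_list : List (List (String × Int))) : Option (List String) :=
  match param_list with
  | [] => none
  | _ :: _ =>
    let counts : PySem.Dict String Int :=
      param_list.foldl (fun c d => d.foldl (fun c kv => c.modify kv.1 0 (· + 1)) c)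
        PySem.Dict.empty
    let n : Int := param_list.length
    some (PySem.List.sorted
      ((counts.items.filter (fun kc => kc.2 == n)).map Prod.fst) (fun x => x) false)

-- ===== PRECONDITION & SPEC =====
-- Pre_ requires each inner association list to have pairwise-distinct keys, as every
-- Python dict does by construction; a duplicate-key list represents no Python input.
def Pre_get_shared_keys (param_list : List (List (String × Int))) : Prop :=
  ∀ d ∈ param_list, (d.map Prod.fst).Nodup
instance (param_list : List (List (String × Int))) : Decidable (Pre_get_shared_keys param_list) := by unfold Pre_get_shared_keys; infer_instance
def pvWitness_get_shared_keys : (List (List (String × Int))) :=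
  [[("a", 0), ("b", 1)], [("b", 2), ("a", 3)], [("a", 1)]]
def Spec_get_shared_keys (param_list : List (List (String × Int))) (out : Option (List String)) : Prop := out = get_shared_keys_alt param_list
instance (param_list : List (List (String × Int))) (out : Option (List String)) : Decidable (Spec_get_shared_keys param_list out) := by unfold Spec_get_shared_keys; infer_instance

-- ===== CLAIM (what is proved, stated in full; the proofs are below) =====
def Claim_equal_get_shared_keys : Prop := ∀ (param_list : List (List (String × Int))), Dom_get_shared_keys param_list → Pre_get_shared_keys param_list → Spec_get_shared_keys param_list (get_shared_keys param_list)

-- ===== LEMMAS AND PROOFS =====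

-- membership in A's intersection loop
theorem mem_inter_foldl (rest : List (List (String × Int))) (s : PySem.Set String)
    (k : String) :
    k ∈ rest.foldl (fun s d => PySem.Set.inter s (d.map Prod.fst)) s ↔
      k ∈ s ∧ ∀ d ∈ rest, k ∈ d.map Prod.fst := by
  induction rest generalizing s with
  | nil => simp
  | cons d rest ih =>
    simp [List.foldl_cons, ih, PySem.Set.mem_inter]
    tauto

theorem nodup_inter_foldl (rest : List (List (String × Int))) (s : PySem.Set String)
    (hs : s.Nodup) :
    (rest.foldl (fun s d => PySem.Set.inter s (d.map Prod.fst)) s).Nodup := by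
  induction rest generalizing s with
  | nil => exact hs
  | cons d rest ih => exact ih _ (PySem.Set.nodup_inter _ _ hs)

-- B's nested counting loop is Counter over the flattened key list
theorem counts_eq_counter (pl : List (List (String × Int))) (e : PySem.Dict String Int) :
    pl.foldl (fun c d => d.foldl (fun c kv => c.modify kv.1 0 (· + 1)) c) e =
      (pl.flatMap (fun d => d.map Prod.fst)).foldl (fun c k => c.modify k 0 (· + 1)) e := by
  induction pl generalizing e with
  | nil => rfl
  | cons d rest ih =>
    simp only [List.foldl_cons, List.flatMap_cons, List.foldl_append, ih]
    rw [List.foldl_map]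

-- under distinct keys per dict, count over the flattened keys ≤ number of dicts
theorem count_le_len (pl : List (List (String × Int))) (k : String)
    (h : ∀ d ∈ pl, (d.map Prod.fst).Nodup) :
    (pl.flatMap (fun d => d.map Prod.fst)).count k ≤ pl.length := by
  induction pl with
  | nil => simp
  | cons d rest ih =>
    have hd : (d.map Prod.fst).count k ≤ 1 :=
      List.nodup_iff_count_le_one.mp (h d (by simp)) k
    have := ih (fun d hd => h d (by simp [hd]))
    simp only [List.flatMap_cons, List.count_append, List.length_cons]
    omega

theorem count_eq_len_iff (pl : List (List (String × Int))) (k : String)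
    (h : ∀ d ∈ pl, (d.map Prod.fst).Nodup) :
    (pl.flatMap (fun d => d.map Prod.fst)).count k = pl.length ↔
      ∀ d ∈ pl, k ∈ d.map Prod.fst := by
  induction pl with
  | nil => simp
  | cons d rest ih =>
    have hd : (d.map Prod.fst).count k ≤ 1 :=
      List.nodup_iff_count_le_one.mp (h d (by simp)) k
    have hrest := count_le_len rest k (fun d hd => h d (by simp [hd]))
    have ih' := ih (fun d hd => h d (by simp [hd]))
    simp only [List.flatMap_cons, List.count_append, List.length_cons, List.mem_cons]
    constructor
    · intro heq
      have h1 : (d.map Prod.fst).count k = 1 := by omega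
      have h2 : (rest.flatMap (fun d => d.map Prod.fst)).count k = rest.length := by omega
      intro d' hd'
      rcases hd' with rfl | hd'
      · exact List.count_pos_iff.mp (by omega)
      · exact (ih'.mp h2) d' hd'
    · intro hall
      have h1 : 0 < (d.map Prod.fst).count k := List.count_pos_iff.mpr (hall d (Or.inl rfl))
      have h2 : (rest.flatMap (fun d => d.map Prod.fst)).count k = rest.length :=
        ih'.mpr (fun d' hd' => hall d' (Or.inr hd'))
      omega

-- ===== VERDICT (by name: the statement is the Claim_ definition above) =====
theorem get_shared_keys_spec : Claim_equal_get_shared_keys := by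
  intro pl _hdom hpre
  unfold Spec_get_shared_keys
  match pl with
  | [] => rfl
  | d0 :: rest =>
    simp only [get_shared_keys, get_shared_keys_alt]
    congr 1
    set ks := (d0 :: rest).flatMap (fun d => d.map Prod.fst) with hks
    rw [counts_eq_counter]
    rw [show (ks.foldl (fun c k => c.modify k 0 (· + 1)) PySem.Dict.empty) = PySem.Dict.counter ks
      from (PySem.Dict.counter_eq_foldl ks).symm]
    have hitems := PySem.Dict.items_eq_map_keys (PySem.Dict.counter ks)
      (PySem.Dict.nodup_keys_counter ks) 0
    rw [hitems, List.filter_map, List.map_map]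
    simp only [Function.comp_def, PySem.Dict.getD_counter, PySem.Dict.keys_counter,
      List.map_id']
    have hL : ∀ k : String,
        k ∈ rest.foldl (fun s d => PySem.Set.inter s (d.map Prod.fst))
            (PySem.Set.ofList (d0.map Prod.fst)) ↔
        k ∈ (PySem.Set.ofList ks).filter
            (fun k => ((ks.count k : Int)) == ((d0 :: rest).length : Int)) := by
      intro k
      rw [mem_inter_foldl]
      simp only [List.mem_filter, PySem.Set.mem_ofList, PySem.Set.mem_ofList, beq_iff_eq,
        Int.natCast_inj, hks]
      rw [count_eq_len_iff _ _ hpre]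
      constructor
      · rintro ⟨h0, hr⟩
        have hall : ∀ d ∈ d0 :: rest, k ∈ d.map Prod.fst := by
          intro d hd; rcases List.mem_cons.mp hd with rfl | hd
          · simpa [PySem.Set.mem_ofList] using h0
          · exact hr d hd
        refine ⟨?_, by exact_mod_cast hall⟩
        simp only [List.mem_flatMap]
        exact ⟨d0, by simp, hall d0 (by simp)⟩
      · rintro ⟨_, hall⟩
        have hall' : ∀ d ∈ d0 :: rest, k ∈ d.map Prod.fst := by exact_mod_cast hall
        exact ⟨by simpa [PySem.Set.mem_ofList] using hall' d0 (by simp),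
          fun d hd => hall' d (by simp [hd])⟩
    have hperm :
        (rest.foldl (fun s d => PySem.Set.inter s (d.map Prod.fst))
            (PySem.Set.ofList (d0.map Prod.fst))).Perm
        ((PySem.Set.ofList ks).filter
            (fun k => ((ks.count k : Int)) == ((d0 :: rest).length : Int))) := by
      refine (List.perm_ext_iff_of_nodup ?_ ?_).mpr hL
      · exact nodup_inter_foldl _ _ (PySem.Set.nodup_ofList _)
      · exact (PySem.Set.nodup_ofList ks).filter _
    exact PySem.List.sorted_eq_sorted_of_perm _ _ _ (fun a b h => h) hperm
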